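-- pv_equiv track=rewrite | github.com/1PI10CS075065036/Unit---4 | src/DB_OP.py | numa
-- ===== SOURCE A (Python) =====
-- def posw(w,n):#position of where
--
--     i=0
--
--     while i<n:
--
--
--
--         if w[i]=="WHERE":
--
--             break
--
--         i=i+1
--
--     return i
--
-- def numa(c):#number of ands
--
--     n=len(c)
--
--
--
--     j=0
--
--     x=posw(c,n)
--
--     i=x
--
--     while i+1<n :
--
--         if c[i]=='AND' :
--
--             j=j+1
--
--         if c[i]=='*':
--
--             break
--
--         i=i+1
--
--     return j
-- ===== SOURCE B (Python) =====
-- def numa(c):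
--     j = 0
--     started = False
--     for i in range(len(c) - 1):
--         t = c[i]
--         if not started:
--             started = (t == "WHERE")
--         elif t == 'AND':
--             j = j + 1
--         elif t == '*':
--             break
--     return j
-- ===== Notes on version B (the rewrite author's own statement) =====
-- stated objective: simpler
-- what changed: Replaced A's separate posw scan (find WHERE) followed by a second counting loop with one single-pass state machine over the indices 0..len(c)-2 carrying a 'started' flag, counting AND and breaking on '*' only after WHERE was seen.
import Mathlib
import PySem

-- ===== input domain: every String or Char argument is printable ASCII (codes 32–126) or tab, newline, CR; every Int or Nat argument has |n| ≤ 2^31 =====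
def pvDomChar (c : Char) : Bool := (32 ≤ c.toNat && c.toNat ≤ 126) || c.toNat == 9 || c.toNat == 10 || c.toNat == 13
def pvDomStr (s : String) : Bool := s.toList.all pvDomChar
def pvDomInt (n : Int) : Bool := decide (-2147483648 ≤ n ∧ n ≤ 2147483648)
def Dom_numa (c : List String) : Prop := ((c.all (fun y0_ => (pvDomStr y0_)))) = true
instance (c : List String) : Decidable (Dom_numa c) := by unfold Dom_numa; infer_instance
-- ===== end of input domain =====

-- B replaces A's two-phase scan (posw to find WHERE, then a counting loop) by one
-- single-pass state machine with a 'started' flag; same O(n) cost, simpler shape.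


-- ===== PORT A =====
-- posw's 'while i < n' loop; the Nat fuel only makes the recursion structural (the
-- top-level call passes n.toNat + 1 ≥ the number of iterations, so it never runs out).
-- w[i] is read with i in range here, so pyGet? with getD "" is exact.
def poswGo (w : List String) (n : Int) : Nat → Int → Int
  | 0, i => i
  | fuel + 1, i =>
    if i < n then
      if (PySem.List.pyGet? w i).getD "" == "WHERE" then i
      else poswGo w n fuel (i + 1)
    else i

def posw (w : List String) (n : Int) : Int := poswGo w n (n.toNat + 1) 0

-- numa's 'while i + 1 < n' loop; same fuel discipline, state (i, j) as in A.
def numaGo (c : List String) (n : Int) : Nat → Int → Int → Int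
  | 0, _, j => j
  | fuel + 1, i, j =>
    if i + 1 < n then
      let j' := if (PySem.List.pyGet? c i).getD "" == "AND" then j + 1 else j
      if (PySem.List.pyGet? c i).getD "" == "*" then j'
      else numaGo c n fuel (i + 1) j'
    else j

def numa (c : List String) : Int :=
  let n : Int := c.length
  numaGo c n (n.toNat + 1) (posw c n) 0

-- ===== PORT B =====
-- the for-loop over range(len(c)-1) with a 'started' flag and a break, as a
-- structural recursion on the same kind of Nat fuel over the index i.
def numaAltGo (c : List String) : Nat → Int → Bool → Int → Int
  | 0, _, _, j => j
  | fuel + 1, i, started, j =>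
    if i + 1 < (c.length : Int) then
      let t := (PySem.List.pyGet? c i).getD ""
      if !started then numaAltGo c fuel (i + 1) (t == "WHERE") j
      else if t == "AND" then numaAltGo c fuel (i + 1) started (j + 1)
      else if t == "*" then j
      else numaAltGo c fuel (i + 1) started j
    else j

def numa_alt (c : List String) : Int := numaAltGo c (c.length + 1) 0 false 0

-- ===== PRECONDITION & SPEC =====
def Spec_numa (c : List String) (out : Int) : Prop := out = numa_alt c
instance (c : List String) (out : Int) : Decidable (Spec_numa c out) := by unfold Spec_numa; infer_instance

-- ===== CLAIM (what is proved, stated in full; the proofs are below) =====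
def Claim_equal_numa : Prop := ∀ (c : List String), Dom_numa c → Spec_numa c (numa c)

-- ===== LEMMAS AND PROOFS =====

theorem poswGo_ge (w : List String) (n : Int) :
    ∀ (k : Nat) (i : Int), i ≤ poswGo w n k i := by
  intro k
  induction k with
  | zero => intro i; simp [poswGo]
  | succ k ih =>
    intro i
    simp only [poswGo]
    split_ifs with h1 h2
    · omega
    · have := ih (i + 1); omega
    · omega

theorem numaGo_stop (c : List String) (n : Int) (k : Nat) (i j : Int)
    (h : ¬ i + 1 < n) : numaGo c n k i j = j := by
  cases k <;> simp [numaGo, h]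

theorem numaAltGo_stop (c : List String) (k : Nat) (i : Int) (s : Bool) (j : Int)
    (h : ¬ i + 1 < (c.length : Int)) : numaAltGo c k i s j = j := by
  cases k <;> simp [numaAltGo, h]

-- numaGo's value does not depend on the fuel once the fuel covers the remaining iterations.
theorem numaGo_fuel (c : List String) (n : Int) :
    ∀ (k k' : Nat) (i j : Int), (n - i).toNat ≤ k → (n - i).toNat ≤ k' →
      numaGo c n k i j = numaGo c n k' i j := by
  intro k
  induction k with
  | zero =>
    intro k' i j hk hk'
    have h : ¬ i + 1 < n := by omega
    rw [numaGo_stop c n 0 i j h, numaGo_stop c n k' i j h]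
  | succ k ih =>
    intro k' i j hk hk'
    by_cases h1 : i + 1 < n
    · cases k' with
      | zero => omega
      | succ k' =>
        simp only [numaGo, if_pos h1]
        split_ifs <;> first | rfl | exact ih k' (i + 1) _ (by omega) (by omega)
    · rw [numaGo_stop c n _ i j h1, numaGo_stop c n k' i j h1]

-- started = true: B's loop from i equals A's counting loop from i.
theorem go_started (c : List String) :
    ∀ (ka kb : Nat) (i j : Int),
      ((c.length : Int) - i).toNat ≤ ka → ((c.length : Int) - i).toNat ≤ kb →
      numaAltGo c kb i true j = numaGo c (c.length : Int) ka i j := by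
  intro ka
  induction ka with
  | zero =>
    intro kb i j hka hkb
    have h : ¬ i + 1 < (c.length : Int) := by omega
    rw [numaAltGo_stop c kb i true j h, numaGo_stop c _ 0 i j h]
  | succ ka ih =>
    intro kb i j hka hkb
    by_cases h1 : i + 1 < (c.length : Int)
    · cases kb with
      | zero => omega
      | succ kb =>
        simp only [numaAltGo, numaGo, if_pos h1, Bool.not_true, Bool.false_eq_true, if_false]
        by_cases hA : ((PySem.List.pyGet? c i).getD "" == "AND") = true
        · have hS : ¬ ((PySem.List.pyGet? c i).getD "" == "*") = true := by simp_all
          simp only [if_pos hA, if_neg hS]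
          exact ih kb (i + 1) (j + 1) (by omega) (by omega)
        · simp only [if_neg hA]
          by_cases hS : ((PySem.List.pyGet? c i).getD "" == "*") = true
          · simp [hS]
          · simp only [if_neg hS]
            exact ih kb (i + 1) j (by omega) (by omega)
    · rw [numaAltGo_stop c kb i true j h1, numaGo_stop c _ _ i j h1]

-- started = false: B's loop from i equals A's loop started at posw's result from i.
theorem go_unstarted (c : List String) :
    ∀ (kb : Nat) (ka kp : Nat) (i j : Int),
      ((c.length : Int) - i).toNat ≤ ka → ((c.length : Int) - i).toNat ≤ kb →
      ((c.length : Int) - i).toNat < kp →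
      numaAltGo c kb i false j = numaGo c (c.length : Int) ka (poswGo c (c.length : Int) kp i) j := by
  intro kb
  induction kb with
  | zero =>
    intro ka kp i j hka hkb hkp
    have h : ¬ i + 1 < (c.length : Int) := by omega
    have hx := poswGo_ge c (c.length : Int) kp i
    rw [numaAltGo_stop c 0 i false j h, numaGo_stop c _ ka _ j (by omega)]
  | succ kb ih =>
    intro ka kp i j hka hkp' hkp
    by_cases h1 : i + 1 < (c.length : Int)
    · have hi : i < (c.length : Int) := by omega
      cases kp with
      | zero => omega
      | succ kp =>
        cases ka with
        | zero => omega
        | succ ka =>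
          simp only [numaAltGo, if_pos h1, Bool.not_false, if_true]
          by_cases hW : ((PySem.List.pyGet? c i).getD "" == "WHERE") = true
          · -- posw stops at i; A's loop sees WHERE (neither AND nor '*') and advances.
            have hA : ((PySem.List.pyGet? c i).getD "" == "AND") = false := by simp_all
            have hS : ((PySem.List.pyGet? c i).getD "" == "*") = false := by simp_all
            have hp : poswGo c (c.length : Int) (kp + 1) i = i := by
              simp [poswGo, hi, hW]
            rw [hp]
            conv_rhs => rw [numaGo]
            simp only [if_pos h1, hA, hS, Bool.false_eq_true, if_false, hW]
            exact go_started c ka kb (i + 1) j (by omega) (by omega)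
          · have hp : poswGo c (c.length : Int) (kp + 1) i = poswGo c (c.length : Int) kp (i + 1) := by
              simp [poswGo, hi, hW]
            rw [hp]
            simp only [Bool.not_eq_true] at hW
            simp only [hW]
            have step := ih ka kp (i + 1) j (by omega) (by omega) (by omega)
            rw [step]
            have hx := poswGo_ge c (c.length : Int) kp (i + 1)
            exact numaGo_fuel c _ ka (ka + 1) _ j (by omega) (by omega)
    · have hx := poswGo_ge c (c.length : Int) kp i
      rw [numaAltGo_stop c _ i false j h1, numaGo_stop c _ _ _ j (by omega)]

-- ===== VERDICT (by name: the statement is the Claim_ definition above) =====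
theorem numa_spec : Claim_equal_numa := by
  intro c _
  unfold Spec_numa numa numa_alt posw
  exact (go_unstarted c (c.length + 1) ((c.length : Int).toNat + 1) ((c.length : Int).toNat + 1)
    0 0 (by omega) (by omega) (by omega)).symm
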